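-- pv_equiv track=rewrite | github.com/darklord1611/selective-inoculation | tests/test_gemma_compatibility.py | fold_system_into_user
-- ===== SOURCE A (Python) =====
-- def fold_system_into_user(messages: list[dict]) -> list[dict]:
--     """Fold system message content into the first user message.
--
--     For models that don't support the system role (e.g., Gemma),
--     prepend the system message content to the first user message.
--     """
--     if not messages or messages[0].get("role") != "system":
--         return messages
--
--     system_content = messages[0]["content"]
--     rest = messages[1:]
--
--     # Find the first user message and prepend system content
--     result = []
--     system_folded = False
--     for msg in rest:
--         if msg["role"] == "user" and not system_folded:
--             result.append({
--                 "role": "user",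
--                 "content": f"{system_content}\n\n{msg['content']}"
--             })
--             system_folded = True
--         else:
--             result.append(msg)
--
--     # If no user message found, prepend as a user message
--     if not system_folded:
--         result = [{"role": "user", "content": system_content}] + result
--
--     return result
-- ===== SOURCE B (Python) =====
-- def fold_system_into_user(messages: list[dict]) -> list[dict]:
--     """Fold system message content into the first user message."""
--     if not messages or messages[0].get("role") != "system":
--         return messages
--
--     system_content = messages[0]["content"]
--
--     def fold(msgs):
--         """Recursively fold system content into the first user message of msgs.
--
--         Returns the rewritten list, or None if msgs contains no user message.
--         """
--         if not msgs:
--             return None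
--         head, tail = msgs[0], msgs[1:]
--         if head["role"] == "user":
--             return [{"role": "user",
--                      "content": f"{system_content}\n\n{head['content']}"}] + tail
--         folded_tail = fold(tail)
--         return None if folded_tail is None else [head] + folded_tail
--
--     rest = messages[1:]
--     folded = fold(rest)
--     if folded is None:
--         return [{"role": "user", "content": system_content}] + rest
--     return folded
-- ===== Notes on version B (the rewrite author's own statement) =====
-- stated objective: alternative
-- what changed: Replaces A's single imperative loop with a boolean 'already folded' flag by a structural recursion returning Optional: the recursion rewrites the first user message it reaches and stops, propagating None when no user message exists; there is no accumulator and no flag.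
-- crash fix: On inputs whose head is a valid system message and where some message AFTER the first user message lacks a 'role' key, A raises KeyError (its loop keeps reading msg['role'] after folding) while B's recursion stops at the first user message and returns the folded list. — e.g. on fold_system_into_user([[("role", "system"), ("content", "s")], [("role", "user"), ("content", "u")], [("content", "y")]]): A raises KeyError, B returns [[("role", "user"), ("content", "s\n\nu")], [("content", "y")]]
import Mathlib
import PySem

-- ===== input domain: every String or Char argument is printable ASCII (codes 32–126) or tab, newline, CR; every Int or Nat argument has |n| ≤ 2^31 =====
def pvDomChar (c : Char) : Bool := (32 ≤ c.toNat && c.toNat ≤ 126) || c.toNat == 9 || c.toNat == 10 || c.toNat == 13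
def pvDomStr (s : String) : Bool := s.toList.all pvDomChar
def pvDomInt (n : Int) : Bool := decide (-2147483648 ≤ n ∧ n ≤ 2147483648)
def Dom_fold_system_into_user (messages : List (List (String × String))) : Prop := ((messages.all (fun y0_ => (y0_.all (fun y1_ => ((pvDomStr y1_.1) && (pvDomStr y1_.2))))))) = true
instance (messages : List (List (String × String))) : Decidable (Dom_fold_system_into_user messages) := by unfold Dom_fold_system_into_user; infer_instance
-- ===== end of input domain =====

-- B replaces A's flagged loop by a structural recursion returning Option; equivalence
-- is about return values (neither version mutates its argument).

-- pvGet m k = the Python lookup m[k]/m.get(k) on an assoc-list dict (first match).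
def pvGet (m : List (String × String)) (k : String) : Option String := (PySem.Dict.mk m).get? k

-- ===== PORT A =====
-- A's loop over `rest` carrying (result, system_folded); dict access msg["k"]
-- is ported as (pvGet msg "k").getD "" — exact inside Pre_, where the key exists.
def fold_system_into_user (messages : List (List (String × String))) : List (List (String × String)) :=
  match messages with
  | [] => messages
  | m0 :: rest =>
    if pvGet m0 "role" ≠ some "system" then messages
    else
      let sc := (pvGet m0 "content").getD ""
      let st := rest.foldl (fun (acc : List (List (String × String)) × Bool) msg =>
        if ((pvGet msg "role").getD "" == "user") && !acc.2 then
          (acc.1 ++ [[("role", "user"), ("content", sc ++ "\n\n" ++ (pvGet msg "content").getD "")]], true)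
        else (acc.1 ++ [msg], acc.2)) ([], false)
      if !st.2 then [[("role", "user"), ("content", sc)]] ++ st.1 else st.1

-- ===== PORT B =====
-- B's inner recursive helper `fold`: rewrite the first user message, or None.
def pvFoldB (sc : String) : List (List (String × String)) → Option (List (List (String × String)))
  | [] => none
  | m :: ms =>
    if (pvGet m "role").getD "" == "user" then
      some ([("role", "user"), ("content", sc ++ "\n\n" ++ (pvGet m "content").getD "")] :: ms)
    else (pvFoldB sc ms).map (m :: ·)

def fold_system_into_user_alt (messages : List (List (String × String))) : List (List (String × String)) :=
  match messages with
  | [] => messages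
  | m0 :: rest =>
    if pvGet m0 "role" ≠ some "system" then messages
    else
      let sc := (pvGet m0 "content").getD ""
      match pvFoldB sc rest with
      | none => [("role", "user"), ("content", sc)] :: rest
      | some folded => folded

-- ===== PRECONDITION & SPEC =====
-- Pre_ excludes exactly the inputs where Python A raises KeyError: a system head
-- without "content", a message in rest without "role", or a first user message
-- without "content".
def Pre_fold_system_into_user (messages : List (List (String × String))) : Prop :=
  match messages with
  | [] => True
  | m0 :: rest =>
    pvGet m0 "role" ≠ some "system" ∨
    ((pvGet m0 "content").isSome = true ∧
     (rest.all (fun m => (pvGet m "role").isSome)) = true ∧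
     ((rest.find? (fun m => (pvGet m "role").getD "" == "user")).all
        (fun m => (pvGet m "content").isSome)) = true)
instance (messages : List (List (String × String))) : Decidable (Pre_fold_system_into_user messages) := by
  unfold Pre_fold_system_into_user; cases messages; infer_instance; infer_instance

def pvWitness_fold_system_into_user : (List (List (String × String))) :=
  [[("role", "system"), ("content", "s")], [("role", "user"), ("content", "u")]]

-- A raises KeyError when the head is a valid system message, everything up to and
-- including the first user message is well-formed, but some later message lacks
-- "role"; B never reads past the first user message and returns the folded list.
def Raises_fold_system_into_user (messages : List (List (String × String))) : Prop :=
  match messages with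
  | [] => False
  | m0 :: rest =>
    pvGet m0 "role" = some "system" ∧
    (pvGet m0 "content").isSome = true ∧
    ((rest.takeWhile (fun m => !((pvGet m "role").getD "" == "user"))).all
       (fun m => (pvGet m "role").isSome)) = true ∧
    (∃ u, rest.find? (fun m => (pvGet m "role").getD "" == "user") = some u ∧
          (pvGet u "content").isSome = true) ∧
    (rest.all (fun m => (pvGet m "role").isSome)) = false
instance (messages : List (List (String × String))) : Decidable (Raises_fold_system_into_user messages) := by
  unfold Raises_fold_system_into_user; cases messages; infer_instance; infer_instance

def pvRaiseWitness_fold_system_into_user : (List (List (String × String))) :=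
  [[("role", "system"), ("content", "s")], [("role", "user"), ("content", "u")], [("content", "y")]]
def pvRaiseWitnessOut_fold_system_into_user : List (List (String × String)) :=
  [[("role", "user"), ("content", "s\n\nu")], [("content", "y")]]

def Spec_fold_system_into_user (messages : List (List (String × String))) (out : List (List (String × String))) : Prop := out = fold_system_into_user_alt messages
instance (messages : List (List (String × String))) (out : List (List (String × String))) : Decidable (Spec_fold_system_into_user messages out) := by unfold Spec_fold_system_into_user; infer_instance

-- ===== CLAIM (what is proved, stated in full; the proofs are below) =====
def Claim_equal_fold_system_into_user : Prop := ∀ (messages : List (List (String × String))), Dom_fold_system_into_user messages → Pre_fold_system_into_user messages → Spec_fold_system_into_user messages (fold_system_into_user messages)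

def Claim_raises_fold_system_into_user : Prop := (∀ (messages : List (List (String × String))), Dom_fold_system_into_user messages → Raises_fold_system_into_user messages → ¬ Pre_fold_system_into_user messages) ∧ (Dom_fold_system_into_user (pvRaiseWitness_fold_system_into_user) ∧ Raises_fold_system_into_user (pvRaiseWitness_fold_system_into_user) ∧ fold_system_into_user_alt (pvRaiseWitness_fold_system_into_user) = pvRaiseWitnessOut_fold_system_into_user)

-- ===== LEMMAS AND PROOFS =====

-- A's loop body, abstracted over the system content.
def pvStepA (sc : String) (acc : List (List (String × String)) × Bool) (msg : List (String × String)) :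
    List (List (String × String)) × Bool :=
  if ((pvGet msg "role").getD "" == "user") && !acc.2 then
    (acc.1 ++ [[("role", "user"), ("content", sc ++ "\n\n" ++ (pvGet msg "content").getD "")]], true)
  else (acc.1 ++ [msg], acc.2)

lemma pvFoldA_true (sc : String) (l : List (List (String × String)))
    (acc : List (List (String × String))) :
    l.foldl (pvStepA sc) (acc, true) = (acc ++ l, true) := by
  induction l generalizing acc with
  | nil => simp
  | cons m ms ih => simp [pvStepA, ih]

-- Invariant: A's fold starting with flag false equals B's recursion, up to the prefix acc.
lemma pvFoldA_eq_FoldB (sc : String) (l : List (List (String × String)))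
    (acc : List (List (String × String))) :
    l.foldl (pvStepA sc) (acc, false) =
      match pvFoldB sc l with
      | none => (acc ++ l, false)
      | some r => (acc ++ r, true) := by
  induction l generalizing acc with
  | nil => simp [pvFoldB]
  | cons m ms ih =>
    simp only [List.foldl_cons, pvFoldB]
    by_cases hu : ((pvGet m "role").getD "" == "user") = true
    · simp only [pvStepA, hu, Bool.not_false, Bool.and_true, if_pos]
      rw [pvFoldA_true]
      simp
    · have hstep : pvStepA sc (acc, false) m = (acc ++ [m], false) := by
        simp [pvStepA, hu]
      rw [hstep, ih]
      cases h : pvFoldB sc ms with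
      | none => simp [hu]
      | some r => simp [hu]

theorem fold_system_into_user_spec : Claim_equal_fold_system_into_user := by
  intro messages _ _
  unfold Spec_fold_system_into_user fold_system_into_user fold_system_into_user_alt
  cases messages with
  | nil => rfl
  | cons m0 rest =>
    by_cases hg : pvGet m0 "role" ≠ some "system"
    · simp [hg]
    · simp only [hg, if_false]
      have := pvFoldA_eq_FoldB ((pvGet m0 "content").getD "") rest []
      simp only [List.nil_append] at this
      show (if _ then _ else _) = _
      rw [show (rest.foldl (fun (acc : List (List (String × String)) × Bool) msg =>
        if ((pvGet msg "role").getD "" == "user") && !acc.2 then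
          (acc.1 ++ [[("role", "user"), ("content", (pvGet m0 "content").getD "" ++ "\n\n" ++ (pvGet msg "content").getD "")]], true)
        else (acc.1 ++ [msg], acc.2)) ([], false)) =
        rest.foldl (pvStepA ((pvGet m0 "content").getD "")) ([], false) from rfl, this]
      cases h : pvFoldB ((pvGet m0 "content").getD "") rest <;> simp

@[simp] theorem fold_system_into_user_raises : Claim_raises_fold_system_into_user := by
  unfold Claim_raises_fold_system_into_user
  exact ⟨by
    intro messages _ hr hp
    cases messages with
    | nil => exact hr
    | cons m0 rest =>
      unfold Raises_fold_system_into_user at hr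
      unfold Pre_fold_system_into_user at hp
      rcases hr with ⟨h1, _, _, _, h5⟩
      rcases hp with hp | ⟨_, h3, _⟩
      · exact hp h1
      · rw [h3] at h5; simp at h5, by decide⟩
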